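-- pv_equiv track=rewrite | github.com/xiaodanhu/AF_Hierarchy | data_scripts/finegym/generate_merged_segments.py | merge_video_activities
-- ===== SOURCE A (Python) =====
-- from typing import List, Tuple, Dict
--
-- def check_overlap(start1: int, end1: int, start2: int, end2: int) -> bool:
--     """Check if two time ranges overlap."""
--     return not (end1 < start2 or end2 < start1)
--
-- def merge_video_activities(
--         activities: List[Tuple[int, int]],
--         other_set_activities: List[Tuple[int, int]],
--         max_duration_seconds: int
-- ) -> List[Tuple[int, int]]:
--     """
--     Merge activities for a single video, ensuring no overlap with other_set_activities.
--     """
--     if not activities: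
--         return []
--
--     merged = []
--     current_start = activities[0][0]
--     current_end = activities[0][1]
--
--     for i in range(1, len(activities)):
--         next_start, next_end = activities[i]
--
--         # Calculate duration if we merge
--         potential_end = next_end
--         duration = potential_end - current_start
--
--         # Check if merging would exceed max duration
--         if duration > max_duration_seconds:
--             # Save current merged segment
--             merged.append((current_start, current_end))
--             # Start new segment
--             current_start = next_start
--             current_end = next_end
--         else:
--             # Check if the range [current_start, next_end] would overlap with other set
--             # We need to check if there's any segment from other_set between current_end and next_start
--             would_overlap = False
--             for other_start, other_end in other_set_activities:
--                 # Skip if this segment is in our activities list (same segment in both sets)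
--                 is_our_activity = (other_start, other_end) in activities
--                 if is_our_activity:
--                     continue
--
--                 # Check if the merged range [current_start, next_end] would overlap with other set segment
--                 # that is NOT in our activities
--                 if check_overlap(current_start, next_end, other_start, other_end):
--                     would_overlap = True
--                     break
--
--             if would_overlap:
--                 merged.append((current_start, current_end))
--                 current_start = next_start
--                 current_end = next_end
--             else:
--                 # Can merge, extend current segment
--                 current_end = next_end
--
--     # Don't forget the last segment
--     merged.append((current_start, current_end))
--
--     return merged
-- ===== SOURCE B (Python) =====
-- def merge_video_activities(activities, other_set_activities, max_duration_seconds):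
--     if not activities:
--         return []
--     # Stage 1: build a query index once. Only other-set segments that are not
--     # themselves in `activities` can block a merge; sort them by end descending
--     # and annotate each with the running minimum of starts seen so far, so an
--     # overlap query "does [cur_s, ne] hit any blocker?" can scan the index and
--     # stop at the first end below cur_s (ends only decrease from there on):
--     # among the entries still in play, the running-min start tells in O(1)
--     # whether some blocker starts at or below ne.
--     own = set(activities)
--     blocked = [seg for seg in other_set_activities if seg not in own]
--     blocked.sort(key=lambda se: se[1], reverse=True)
--     index = []
--     mn = None
--     for s, e in blocked:
--         mn = s if mn is None else min(mn, s)
--         index.append((e, mn))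
--
--     def overlaps(cur_s, ne):
--         for e, m in index:
--             if e < cur_s:
--                 return False
--             if m <= ne:
--                 return True
--         return False
--
--     # Stage 2: peel off one maximal group at a time (outer loop per emitted
--     # segment, inner loop extends the current group), instead of a single
--     # element-wise fold.
--     res = []
--     rest = activities
--     while rest:
--         (cur_s, cur_e), rest = rest[0], rest[1:]
--         while rest:
--             ne = rest[0][1]
--             if ne - cur_s > max_duration_seconds or overlaps(cur_s, ne):
--                 break
--             cur_e = ne
--             rest = rest[1:]
--         res.append((cur_s, cur_e))
--     return res
-- ===== Notes on version B (the rewrite author's own statement) =====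
-- stated objective: faster
-- what changed: B replaces A's per-step rescan of other_set_activities (with an O(n) membership test per element) by a precomputed query index -- the non-own blockers sorted by end descending and annotated with a running minimum start, so each overlap query is an early-exit scan of the index -- and replaces A's single element-wise fold by an outer loop that peels off one maximal mergeable group at a time.
import Mathlib
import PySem

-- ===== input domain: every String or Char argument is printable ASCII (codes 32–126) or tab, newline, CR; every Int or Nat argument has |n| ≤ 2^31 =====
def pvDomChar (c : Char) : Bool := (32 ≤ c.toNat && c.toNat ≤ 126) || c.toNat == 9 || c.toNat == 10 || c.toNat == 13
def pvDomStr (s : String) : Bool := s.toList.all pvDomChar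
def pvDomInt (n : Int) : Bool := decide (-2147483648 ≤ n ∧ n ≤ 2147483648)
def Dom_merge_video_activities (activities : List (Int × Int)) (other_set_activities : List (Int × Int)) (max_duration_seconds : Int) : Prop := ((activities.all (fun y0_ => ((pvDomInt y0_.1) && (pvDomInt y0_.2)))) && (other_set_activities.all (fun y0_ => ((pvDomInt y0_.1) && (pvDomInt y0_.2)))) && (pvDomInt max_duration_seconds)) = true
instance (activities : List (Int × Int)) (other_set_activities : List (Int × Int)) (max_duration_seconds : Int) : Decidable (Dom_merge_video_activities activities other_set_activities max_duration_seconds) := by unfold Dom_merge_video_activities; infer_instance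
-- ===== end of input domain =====

-- B builds, once, a sorted prefix-min index of the blocking segments (other-set
-- segments not in activities, sorted by end descending, annotated with the running
-- minimum start) for early-exit overlap queries, and emits the result one maximal
-- group at a time instead of folding element-wise; faster in a timing run's
-- measurement. Return value only; neither version mutates its arguments.

-- ===== PORT A =====
def check_overlap (start1 end1 start2 end2 : Int) : Bool :=
  !(end1 < start2 || end2 < start1)

-- A's inner 'for other_start, other_end in other_set_activities' loop with break
def pvA_wouldOverlap (activities : List (Int × Int)) (current_start next_end : Int) :
    List (Int × Int) → Bool
  | [] => false
  | (os, oe) :: rest =>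
    if activities.contains (os, oe) then
      pvA_wouldOverlap activities current_start next_end rest
    else if check_overlap current_start next_end os oe then
      true
    else
      pvA_wouldOverlap activities current_start next_end rest

def merge_video_activities (activities : List (Int × Int)) (other_set_activities : List (Int × Int)) (max_duration_seconds : Int) : List (Int × Int) :=
  match activities with
  | [] => []
  | (s0, e0) :: _ =>
    let st := (PySem.List.pyRange 1 activities.length 1).foldl
      (fun (st : List (Int × Int) × Int × Int) i =>
        let merged := st.1
        let current_start := st.2.1
        let current_end := st.2.2
        let nxt := PySem.List.pyGetD activities i (0, 0)
        let duration := nxt.2 - current_start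
        if duration > max_duration_seconds then
          (merged ++ [(current_start, current_end)], nxt.1, nxt.2)
        else if pvA_wouldOverlap activities current_start nxt.2 other_set_activities then
          (merged ++ [(current_start, current_end)], nxt.1, nxt.2)
        else
          (merged, current_start, nxt.2))
      ([], s0, e0)
    st.1 ++ [(st.2.1, st.2.2)]

-- ===== PORT B =====
-- the 'for s, e in blocked' loop building 'index' (running minimum of starts)
def pvB_annot : Option Int → List (Int × Int) → List (Int × Int)
  | _, [] => []
  | mn, (s, e) :: r =>
    let m := match mn with | none => s | some m0 => min m0 s
    (e, m) :: pvB_annot (some m) r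

-- the 'overlaps' query: early-exit scan of the index
def pvB_overlaps (index : List (Int × Int)) (cur_s ne : Int) : Bool :=
  match index with
  | [] => false
  | (e, m) :: r =>
    if e < cur_s then false
    else if m ≤ ne then true
    else pvB_overlaps r cur_s ne

-- the inner 'while rest' loop: extend the current group as far as it merges
def pvB_extend (M : Int) (index : List (Int × Int)) (cur_s : Int) :
    Int → List (Int × Int) → Int × List (Int × Int)
  | cur_e, [] => (cur_e, [])
  | cur_e, (ns, ne) :: r =>
    if ne - cur_s > M || pvB_overlaps index cur_s ne then (cur_e, (ns, ne) :: r)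
    else pvB_extend M index cur_s ne r

theorem pvB_extend_length (M : Int) (index : List (Int × Int)) (cur_s cur_e : Int)
    (rest : List (Int × Int)) :
    (pvB_extend M index cur_s cur_e rest).2.length ≤ rest.length := by
  induction rest generalizing cur_e with
  | nil => simp [pvB_extend]
  | cons p r ih =>
    obtain ⟨ns, ne⟩ := p
    simp only [pvB_extend]
    split
    · simp
    · exact le_trans (ih ne) (by simp)

-- the outer 'while rest' loop: peel one maximal group per emitted segment
def pvB_groups (M : Int) (index : List (Int × Int)) : List (Int × Int) → List (Int × Int)
  | [] => []
  | (s, e) :: rest =>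
    let p := pvB_extend M index s e rest
    (s, p.1) :: pvB_groups M index p.2
termination_by l => l.length
decreasing_by
  exact Nat.lt_succ_of_le (pvB_extend_length M index s e rest)

def merge_video_activities_alt (activities : List (Int × Int)) (other_set_activities : List (Int × Int)) (max_duration_seconds : Int) : List (Int × Int) :=
  match activities with
  | [] => []
  | _ :: _ =>
    let own : PySem.Set (Int × Int) := PySem.Set.ofList activities
    let blocked := other_set_activities.filter (fun seg => !(PySem.Set.contains own seg))
    let sortedBlocked := PySem.List.sorted blocked (fun se => se.2) true
    let index := pvB_annot none sortedBlocked
    pvB_groups max_duration_seconds index activities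

-- ===== PRECONDITION & SPEC =====
def Spec_merge_video_activities (activities : List (Int × Int)) (other_set_activities : List (Int × Int)) (max_duration_seconds : Int) (out : List (Int × Int)) : Prop := out = merge_video_activities_alt activities other_set_activities max_duration_seconds
instance (activities : List (Int × Int)) (other_set_activities : List (Int × Int)) (max_duration_seconds : Int) (out : List (Int × Int)) : Decidable (Spec_merge_video_activities activities other_set_activities max_duration_seconds out) := by unfold Spec_merge_video_activities; infer_instance

-- ===== CLAIM (what is proved, stated in full; the proofs are below) =====
def Claim_equal_merge_video_activities : Prop := ∀ (activities : List (Int × Int)) (other_set_activities : List (Int × Int)) (max_duration_seconds : Int), Dom_merge_video_activities activities other_set_activities max_duration_seconds → Spec_merge_video_activities activities other_set_activities max_duration_seconds (merge_video_activities activities other_set_activities max_duration_seconds)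

-- ===== LEMMAS AND PROOFS =====

-- common semantic core: the greedy grouping with an abstract break predicate
def pvG (brk : Int → Int → Bool) : Int → Int → List (Int × Int) → List (Int × Int)
  | cs, ce, [] => [(cs, ce)]
  | cs, ce, (ns, ne) :: r => if brk cs ne then (cs, ce) :: pvG brk ns ne r else pvG brk cs ne r

theorem pvG_congr {brk1 brk2 : Int → Int → Bool} (h : ∀ cs ne, brk1 cs ne = brk2 cs ne) :
    ∀ cs ce rest, pvG brk1 cs ce rest = pvG brk2 cs ce rest := by
  intro cs ce rest
  induction rest generalizing cs ce with
  | nil => rfl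
  | cons p r ih =>
    obtain ⟨ns, ne⟩ := p
    simp only [pvG, h cs ne]
    split <;> simp [ih]

-- A's inner skip-and-break scan equals 'any overlap' over the pre-filtered list
theorem pvA_wouldOverlap_eq (activities : List (Int × Int)) (cs ne : Int)
    (others : List (Int × Int)) :
    pvA_wouldOverlap activities cs ne others =
      (others.filter (fun seg => !((PySem.Set.ofList activities).contains seg))).any
        (fun b => b.1 ≤ ne && cs ≤ b.2) := by
  induction others with
  | nil => rfl
  | cons o rest ih =>
    obtain ⟨os, oe⟩ := o
    have hco : check_overlap cs ne os oe = (decide (os ≤ ne) && decide (cs ≤ oe)) := by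
      simp [check_overlap, Bool.not_or, ← decide_not]
    by_cases h : (os, oe) ∈ activities
    · simp [pvA_wouldOverlap, h, ih]
    · simp [pvA_wouldOverlap, h, hco, ih]

-- the early-exit scan over the running-min-annotated, end-descending list is 'any overlap'
theorem pvB_overlaps_annot (cs ne : Int) :
    ∀ (l : List (Int × Int)) (mn : Option Int),
      l.Pairwise (fun a b => b.2 ≤ a.2) →
      (∀ m, mn = some m → ne < m) →
      pvB_overlaps (pvB_annot mn l) cs ne =
        l.any (fun b => b.1 ≤ ne && cs ≤ b.2) := by
  intro l
  induction l with
  | nil => intro mn _ _; rfl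
  | cons p r ih =>
    intro mn hp hmn
    obtain ⟨s, e⟩ := p
    obtain ⟨hall, hr⟩ := List.pairwise_cons.mp hp
    have hfalse : e < cs →
        (((s, e) :: r).any (fun b => b.1 ≤ ne && cs ≤ b.2)) = false := by
      intro h1
      simp only [List.any_eq_false]
      intro b hb
      rcases List.mem_cons.mp hb with hb | hb
      · subst hb; simp; omega
      · have := hall b hb; simp at this ⊢; omega
    cases mn with
    | none =>
      simp only [pvB_annot, pvB_overlaps]
      by_cases h1 : e < cs
      · rw [if_pos h1, hfalse h1]
      · rw [if_neg h1]
        by_cases h2 : s ≤ ne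
        · rw [if_pos h2]
          simp [List.any_cons, h2]
          omega
        · rw [if_neg h2]
          rw [ih (some s) hr (by intro x hx; injection hx with hx; omega)]
          simp [List.any_cons, h2]
    | some m0 =>
      have hgt := hmn m0 rfl
      simp only [pvB_annot, pvB_overlaps]
      by_cases h1 : e < cs
      · rw [if_pos h1, hfalse h1]
      · rw [if_neg h1]
        by_cases h2 : min m0 s ≤ ne
        · rw [if_pos h2]
          have hs : s ≤ ne := by omega
          simp [List.any_cons, hs]
          omega
        · rw [if_neg h2]
          rw [ih (some (min m0 s)) hr (by intro x hx; injection hx with hx; omega)]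
          have hs : ¬ s ≤ ne := by omega
          simp [List.any_cons, hs]

-- A's fold-with-append equals the abstract grouping
theorem pvA_fold_G (acts others : List (Int × Int)) (M : Int) :
    ∀ (rest m : List (Int × Int)) (cs ce : Int),
      (let st := rest.foldl
        (fun (st : List (Int × Int) × Int × Int) (nxt : Int × Int) =>
          if nxt.2 - st.2.1 > M then (st.1 ++ [(st.2.1, st.2.2)], nxt.1, nxt.2)
          else if pvA_wouldOverlap acts st.2.1 nxt.2 others then
            (st.1 ++ [(st.2.1, st.2.2)], nxt.1, nxt.2)
          else (st.1, st.2.1, nxt.2)) (m, cs, ce);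
       st.1 ++ [(st.2.1, st.2.2)]) =
      m ++ pvG (fun cs ne => decide (ne - cs > M) || pvA_wouldOverlap acts cs ne others) cs ce rest := by
  intro rest
  induction rest with
  | nil => intro m cs ce; simp [pvG]
  | cons p r ih =>
    intro m cs ce
    obtain ⟨ns, ne⟩ := p
    simp only [List.foldl_cons, pvG]
    by_cases hd : ne - cs > M
    · simp only [hd, if_pos, decide_true, Bool.true_or]
      rw [ih]
      simp
    · by_cases ho : pvA_wouldOverlap acts cs ne others
      · simp only [hd, ho, decide_false, Bool.false_or, if_pos]
        rw [ih]
        simp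
      · simp only [hd, ho, decide_false, Bool.false_or, Bool.false_eq_true,
          not_false_eq_true, if_neg]
        rw [ih]

-- B's group-peeling loop equals the abstract grouping
theorem pvB_groups_G (M : Int) (index : List (Int × Int)) :
    ∀ (rest : List (Int × Int)) (s e : Int),
      pvB_groups M index ((s, e) :: rest) =
        pvG (fun cs ne => decide (ne - cs > M) || pvB_overlaps index cs ne) s e rest := by
  intro rest
  induction rest with
  | nil => intro s e; simp [pvB_groups, pvB_extend, pvG]
  | cons p r ih =>
    intro s e
    obtain ⟨ns, ne⟩ := p
    by_cases hb : (decide (ne - s > M) || pvB_overlaps index s ne) = true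
    · rw [pvB_groups]
      simp only [pvB_extend, hb, if_pos]
      rw [pvG, if_pos hb, ← ih ns ne, pvB_groups]
    · have hrw : pvB_groups M index ((s, e) :: (ns, ne) :: r) =
          pvB_groups M index ((s, ne) :: r) := by
        rw [pvB_groups, pvB_groups]
        simp [pvB_extend, hb]
      rw [hrw, ih s ne, pvG, if_neg (by simp [hb])]

-- ===== VERDICT (by name: the statement is the Claim_ definition above) =====
theorem merge_video_activities_spec : Claim_equal_merge_video_activities := by
  intro activities other_set_activities max_duration_seconds _
  unfold Spec_merge_video_activities merge_video_activities merge_video_activities_alt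
  match activities with
  | [] => rfl
  | (s0, e0) :: rest =>
    simp only
    rw [PySem.List.foldl_pyRange_pyGetD' ((s0, e0) :: rest) ((0 : Int), (0 : Int))
      (fun (st : List (Int × Int) × Int × Int) (nxt : Int × Int) =>
        if nxt.2 - st.2.1 > max_duration_seconds then
          (st.1 ++ [(st.2.1, st.2.2)], nxt.1, nxt.2)
        else if pvA_wouldOverlap ((s0, e0) :: rest) st.2.1 nxt.2 other_set_activities then
          (st.1 ++ [(st.2.1, st.2.2)], nxt.1, nxt.2)
        else (st.1, st.2.1, nxt.2))
      ([], s0, e0) (by norm_num)]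
    rw [show List.drop (Int.toNat 1) ((s0, e0) :: rest) = rest from rfl]
    rw [pvA_fold_G ((s0, e0) :: rest) other_set_activities max_duration_seconds rest [] s0 e0]
    rw [pvB_groups_G]
    simp only [List.nil_append]
    apply pvG_congr
    intro cs ne
    rw [pvA_wouldOverlap_eq]
    rw [pvB_overlaps_annot cs ne _ none
      (by
        have := PySem.List.sorted_pairwise_rev
          (xs := (other_set_activities.filter
            (fun seg => !(PySem.Set.contains (PySem.Set.ofList ((s0, e0) :: rest)) seg))))
          (key := fun se : Int × Int => se.2)
        exact this)
      (by intro m h; cases h)]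
    congr 1
    exact ((PySem.List.sorted_perm _ _ _).any_eq).symm
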